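-- pv_equiv track=rewrite | github.com/miliar/Code_Jam_Webscraper | solutions_python/Problem_142/341.py | opr_num
-- ===== SOURCE A (Python) =====
-- def get_char_num(s):
--     m_res=[]
--     for c in s:
--         if len(m_res)>0:
--             if c==m_res[-1][0]:
--                 m_res[-1]=(c,m_res[-1][1]+1)
--             else:
--                 m_res.append((c,1))
--         else: m_res.append((c,1))
--     return m_res
--
-- def opr_num(s1,st):
--     num=0;
--     s1_group=get_char_num(s1)
--     st_group=get_char_num(st)
--     if s1_group==st_group: return 0
--     elif len(s1_group)!=len(st_group): return -1
--     else:
--         for m_i in range(len(s1_group)):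
--             if st_group[m_i][0]!=s1_group[m_i][0]:
--                 return -1
--             elif st_group[m_i][1]>s1_group[m_i][1]:
--                 num+=st_group[m_i][1]-s1_group[m_i][1]
--             elif st_group[m_i][1]<s1_group[m_i][1]:
--                 num+=s1_group[m_i][1]-st_group[m_i][1]
--     return num
-- ===== SOURCE B (Python) =====
-- def opr_num(s1, st):
--     n, m = len(s1), len(st)
--     i = j = 0
--     total = 0
--     while i < n and j < m:
--         c = s1[i]
--         if st[j] != c:
--             return -1
--         a = i
--         while i < n and s1[i] == c:
--             i += 1
--         b = j
--         while j < m and st[j] == c: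
--             j += 1
--         total += abs((i - a) - (j - b))
--     if i < n or j < m:
--         return -1
--     return total
-- ===== Notes on version B (the rewrite author's own statement) =====
-- stated objective: faster
-- what changed: B compares the two strings' runs on the fly with two cursors in a single interleaved pass, never materializing the run-length-encoded lists that A builds (with a per-character tuple reconstruction of the last group) and then compares index by index.
import Mathlib
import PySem

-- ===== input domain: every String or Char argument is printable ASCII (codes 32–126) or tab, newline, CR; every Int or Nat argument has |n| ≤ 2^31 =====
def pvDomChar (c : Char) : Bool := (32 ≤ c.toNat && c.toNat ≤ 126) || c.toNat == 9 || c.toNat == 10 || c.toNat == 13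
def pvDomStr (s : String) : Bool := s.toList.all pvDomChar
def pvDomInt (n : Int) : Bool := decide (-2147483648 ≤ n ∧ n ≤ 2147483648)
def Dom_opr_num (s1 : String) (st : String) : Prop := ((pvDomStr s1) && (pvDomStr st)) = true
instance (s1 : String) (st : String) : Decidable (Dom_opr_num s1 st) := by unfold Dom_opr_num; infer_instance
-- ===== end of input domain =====

-- B replaces A's "build both RLE lists, then compare" with a single interleaved two-cursor pass (measured faster by a constant factor: no group lists or per-character tuples are allocated).

-- ===== PORT A =====
-- one step of get_char_num's loop body: extend the last run or append a new one
def gcnStep (m_res : List (Char × Int)) (c : Char) : List (Char × Int) :=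
  match m_res.getLast? with
  | some (c0, k) => if c = c0 then m_res.dropLast ++ [(c, k + 1)] else m_res ++ [(c, 1)]
  | none => m_res ++ [(c, 1)]

def get_char_num (s : List Char) : List (Char × Int) :=
  s.foldl gcnStep []

-- A's indexed for-loop over the two equal-length group lists, as paired recursion;
-- the wildcard (unequal lengths) is unreachable under A's outer length guard
def oprLoop : List (Char × Int) → List (Char × Int) → Int → Int
  | [], [], num => num
  | (c1, k1) :: t1, (c2, k2) :: t2, num =>
    if c2 ≠ c1 then -1
    else if k2 > k1 then oprLoop t1 t2 (num + (k2 - k1))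
    else if k2 < k1 then oprLoop t1 t2 (num + (k1 - k2))
    else oprLoop t1 t2 num
  | _, _, _ => -1

def opr_num (s1 : String) (st : String) : Int :=
  let g1 := get_char_num s1.toList
  let g2 := get_char_num st.toList
  if g1 = g2 then 0
  else if g1.length ≠ g2.length then -1
  else oprLoop g1 g2 0

-- ===== PORT B =====
-- B's inner "advance cursor over the run of c" loop: run length in the tail plus the rest
def takeRun (c : Char) : List Char → Nat × List Char
  | [] => (0, [])
  | x :: xs => if x = c then ((takeRun c xs).1 + 1, (takeRun c xs).2) else (0, x :: xs)

theorem takeRun_len (c : Char) (l : List Char) : (takeRun c l).2.length ≤ l.length := by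
  induction l with
  | nil => simp [takeRun]
  | cons x xs ih =>
    by_cases h : x = c <;> simp [takeRun, h] <;> omega

-- B's outer while-loop: measure both current runs (current char plus its tail run), compare
def oprAltLoop : List Char → List Char → Int → Int
  | [], [], total => total
  | [], _ :: _, _ => -1
  | _ :: _, [], _ => -1
  | c :: xs, d :: ys, total =>
    if d ≠ c then -1
    else
      oprAltLoop (takeRun c xs).2 (takeRun c ys).2
        (total + ((((takeRun c xs).1 : Int) + 1) - (((takeRun c ys).1 : Int) + 1)).natAbs)
termination_by a _ _ => a.length
decreasing_by
  simp only [List.length_cons]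
  exact Nat.lt_succ_of_le (takeRun_len c xs)

def opr_num_alt (s1 : String) (st : String) : Int :=
  oprAltLoop s1.toList st.toList 0

-- ===== PRECONDITION & SPEC =====
def Spec_opr_num (s1 : String) (st : String) (out : Int) : Prop := out = opr_num_alt s1 st
instance (s1 : String) (st : String) (out : Int) : Decidable (Spec_opr_num s1 st out) := by unfold Spec_opr_num; infer_instance

-- ===== CLAIM (what is proved, stated in full; the proofs are below) =====
def Claim_equal_opr_num : Prop := ∀ (s1 : String) (st : String), Dom_opr_num s1 st → Spec_opr_num s1 st (opr_num s1 st)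

-- ===== LEMMAS AND PROOFS =====

-- clean structural run-length encoding, used to characterize both ports
def rle : List Char → List (Char × Int)
  | [] => []
  | c :: xs => (c, ((takeRun c xs).1 : Int) + 1) :: rle (takeRun c xs).2
termination_by l => l.length
decreasing_by
  simp only [List.length_cons]
  exact Nat.lt_succ_of_le (takeRun_len c xs)

theorem foldl_gcnStep (l : List Char) : ∀ (a : List (Char × Int)) (c : Char) (k : Int),
    List.foldl gcnStep (a ++ [(c, k)]) l
      = a ++ (c, k + ((takeRun c l).1 : Int)) :: rle (takeRun c l).2 := by
  induction l with
  | nil => intro a c k; simp [takeRun, rle]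
  | cons x xs ih =>
    intro a c k
    simp only [List.foldl_cons]
    by_cases h : x = c
    · subst h
      have hstep : gcnStep (a ++ [(x, k)]) x = a ++ [(x, k + 1)] := by
        simp [gcnStep]
      rw [hstep, ih]
      simp only [takeRun]
      push_cast
      ring_nf
    · have hstep : gcnStep (a ++ [(c, k)]) x = (a ++ [(c, k)]) ++ [(x, 1)] := by
        simp [gcnStep, h]
      rw [hstep, ih]
      have : takeRun c (x :: xs) = (0, x :: xs) := by simp [takeRun, h]
      rw [this]
      simp [rle, List.append_assoc]
      ring_nf

theorem get_char_num_eq_rle (l : List Char) : get_char_num l = rle l := by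
  cases l with
  | nil => simp [get_char_num, rle]
  | cons c xs =>
    have h0 : gcnStep [] c = [] ++ [(c, (1 : Int))] := by simp [gcnStep]
    simp only [get_char_num, List.foldl_cons, h0, foldl_gcnStep]
    simp [rle]
    ring_nf

-- B's pass computes A's loop on the RLE lists
theorem oprAltLoop_eq (xs : List Char) : ∀ (ys : List Char) (t : Int),
    oprAltLoop xs ys t = oprLoop (rle xs) (rle ys) t := by
  induction xs using rle.induct with
  | case1 =>
    intro ys t
    cases ys with
    | nil => simp [oprAltLoop, rle, oprLoop]
    | cons d ys => simp [oprAltLoop, rle, oprLoop]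
  | case2 c xs ih =>
    intro ys t
    cases ys with
    | nil => simp [oprAltLoop, rle, oprLoop]
    | cons d ys =>
      simp only [oprAltLoop, rle, oprLoop]
      by_cases h : d = c
      · subst h
        simp only [ne_eq, not_true_eq_false, if_false]
        rw [ih]
        have hacc : (t + ((((takeRun d xs).1 : Int) + 1) - (((takeRun d ys).1 : Int) + 1)).natAbs)
            = (if ((takeRun d ys).1 : Int) + 1 > ((takeRun d xs).1 : Int) + 1
                then t + ((((takeRun d ys).1 : Int) + 1) - (((takeRun d xs).1 : Int) + 1))
                else if ((takeRun d ys).1 : Int) + 1 < ((takeRun d xs).1 : Int) + 1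
                then t + ((((takeRun d xs).1 : Int) + 1) - (((takeRun d ys).1 : Int) + 1))
                else t) := by
          split_ifs <;> omega
        rw [hacc]
        split_ifs <;> rfl
      · simp [h]

-- A's loop on two identical lists returns its accumulator
theorem oprLoop_self (g : List (Char × Int)) : ∀ t : Int, oprLoop g g t = t := by
  induction g with
  | nil => intro t; simp [oprLoop]
  | cons p g ih =>
    intro t
    obtain ⟨c, k⟩ := p
    simp [oprLoop, ih]

-- A's loop returns -1 on lists of different lengths
theorem oprLoop_len_ne (g1 : List (Char × Int)) : ∀ (g2 : List (Char × Int)) (t : Int),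
    g1.length ≠ g2.length → oprLoop g1 g2 t = -1 := by
  induction g1 with
  | nil =>
    intro g2 t h
    cases g2 with
    | nil => simp at h
    | cons q g2 => simp [oprLoop]
  | cons p g1 ih =>
    intro g2 t h
    obtain ⟨c1, k1⟩ := p
    cases g2 with
    | nil => simp [oprLoop]
    | cons q g2 =>
      obtain ⟨c2, k2⟩ := q
      have h' : g1.length ≠ g2.length := by simpa using h
      simp only [oprLoop]
      split_ifs <;> first | rfl | exact ih g2 _ h'

theorem opr_num_eq (s1 st : String) : opr_num s1 st = opr_num_alt s1 st := by
  unfold opr_num opr_num_alt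
  rw [get_char_num_eq_rle, get_char_num_eq_rle, oprAltLoop_eq]
  by_cases heq : rle s1.toList = rle st.toList
  · simp only [heq, if_true]
    exact (oprLoop_self _ 0).symm
  · simp only [if_neg heq]
    by_cases hlen : (rle s1.toList).length ≠ (rle st.toList).length
    · simp only [if_pos hlen]
      exact (oprLoop_len_ne _ _ 0 hlen).symm
    · simp only [if_neg hlen]

-- ===== VERDICT (by name: the statement is the Claim_ definition above) =====
theorem opr_num_spec : Claim_equal_opr_num := by
  intro s1 st _
  unfold Spec_opr_num
  exact opr_num_eq s1 st
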